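-- pv_equiv track=rewrite | github.com/TanusSzabo/UNICAMP | MC102/2s2021/12/lab12_avançado.py | Contem
-- ===== SOURCE A (Python) =====
-- def Contem(imagem_1, imagem_2):
--     linhas_1 = len(imagem_1)          # quantidade de linhas na imagem 1
--     colunas_1 = len(imagem_1[0])      # quantidade de colunas na imagem 1
--     linhas_2 = len(imagem_2)          # quantidade de linhas na imagem 2
--     colunas_2 = len(imagem_2[0])      # quantidade de colunas na imagem 2
--     for i in range(linhas_1 - linhas_2 + 1):
--         for j in range(colunas_1 - colunas_2 + 1):
--             sub_imagem_1 = [ linha[j:j+colunas_2] for linha in imagem_1[i:i+linhas_2] ]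
--             if sub_imagem_1 == imagem_2:
--                 return True
--
--     return False
-- ===== SOURCE B (Python) =====
-- def Contem(imagem_1, imagem_2):
--     l2 = len(imagem_2)
--     c2 = len(imagem_2[0])
--     js = list(range(len(imagem_1[0]) - c2 + 1))
--     # occurrence table: for each row of imagem_1 and each row of imagem_2,
--     # the (ordered) list of columns j where the pattern row occurs
--     occ = [[[j for j in js if row[j:j+c2] == p] for p in imagem_2] for row in imagem_1]
--     for i in range(len(imagem_1) - l2 + 1):
--         cand = occ[i][0]
--         for k in range(1, l2):
--             cand = [j for j in cand if j in occ[i+k][k]]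
--         if cand:
--             return True
--     return False
-- ===== Notes on version B (the rewrite author's own statement) =====
-- stated objective: alternative
-- what changed: Instead of extracting and comparing a full L2xC2 subgrid at every anchor (i,j), B precomputes once, for every image row and every pattern row, the list of columns where that pattern row occurs, and then for each vertical offset i intersects the candidate column sets of the L2 stacked rows; a match exists iff some intersection is nonempty.
import Mathlib
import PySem

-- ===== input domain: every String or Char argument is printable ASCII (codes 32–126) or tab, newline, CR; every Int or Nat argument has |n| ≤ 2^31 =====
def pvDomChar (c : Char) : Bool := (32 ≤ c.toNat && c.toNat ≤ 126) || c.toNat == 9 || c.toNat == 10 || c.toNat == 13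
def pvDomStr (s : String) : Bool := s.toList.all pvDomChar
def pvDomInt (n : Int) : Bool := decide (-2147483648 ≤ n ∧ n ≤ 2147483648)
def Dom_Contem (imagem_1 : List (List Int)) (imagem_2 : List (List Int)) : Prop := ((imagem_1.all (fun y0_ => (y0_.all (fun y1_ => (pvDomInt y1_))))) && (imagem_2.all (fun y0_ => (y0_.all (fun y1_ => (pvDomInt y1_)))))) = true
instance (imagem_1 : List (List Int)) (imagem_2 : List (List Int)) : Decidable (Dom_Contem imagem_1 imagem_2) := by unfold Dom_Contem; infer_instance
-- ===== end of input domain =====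

-- B replaces per-anchor subgrid extraction by a precomputed per-(image row, pattern row)
-- occurrence-column table combined by intersection; alternative structure, not claimed faster.

-- ===== PORT A =====
def Contem (imagem_1 : List (List Int)) (imagem_2 : List (List Int)) : Bool :=
  let linhas_1 : Int := imagem_1.length
  let colunas_1 : Int := (PySem.List.pyGetD imagem_1 0 []).length
  let linhas_2 : Int := imagem_2.length
  let colunas_2 : Int := (PySem.List.pyGetD imagem_2 0 []).length
  (PySem.List.pyRange 0 (linhas_1 - linhas_2 + 1) 1).any fun i =>
    (PySem.List.pyRange 0 (colunas_1 - colunas_2 + 1) 1).any fun j =>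
      ((PySem.List.slice imagem_1 (some i) (some (i + linhas_2))).map
        (fun linha => PySem.List.slice linha (some j) (some (j + colunas_2)))) == imagem_2

-- ===== PORT B =====
def Contem_alt (imagem_1 : List (List Int)) (imagem_2 : List (List Int)) : Bool :=
  let l2 : Int := imagem_2.length
  let c2 : Int := (PySem.List.pyGetD imagem_2 0 []).length
  let js := PySem.List.pyRange 0 ((PySem.List.pyGetD imagem_1 0 []).length - c2 + 1) 1
  let occ := imagem_1.map (fun row =>
    imagem_2.map (fun p => js.filter (fun j => PySem.List.slice row (some j) (some (j + c2)) == p)))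
  (PySem.List.pyRange 0 ((imagem_1.length : Int) - l2 + 1) 1).any fun i =>
    let cand0 := PySem.List.pyGetD (PySem.List.pyGetD occ i []) 0 []
    let cand := (PySem.List.pyRange 1 l2 1).foldl
      (fun cand k => cand.filter (fun j =>
        (PySem.List.pyGetD (PySem.List.pyGetD occ (i + k) []) k []).contains j)) cand0
    !cand.isEmpty

-- ===== PRECONDITION & SPEC =====
-- A raises IndexError (imagem_1[0] / imagem_2[0]) iff one of the images is the empty list.
def Pre_Contem (imagem_1 : List (List Int)) (imagem_2 : List (List Int)) : Prop :=
  imagem_1 ≠ [] ∧ imagem_2 ≠ []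
instance (imagem_1 : List (List Int)) (imagem_2 : List (List Int)) : Decidable (Pre_Contem imagem_1 imagem_2) := by unfold Pre_Contem; infer_instance
def pvWitness_Contem : List (List Int) × List (List Int) := ([[1, 2], [3, 4]], [[4]])

def Spec_Contem (imagem_1 : List (List Int)) (imagem_2 : List (List Int)) (out : Bool) : Prop := out = Contem_alt imagem_1 imagem_2
instance (imagem_1 : List (List Int)) (imagem_2 : List (List Int)) (out : Bool) : Decidable (Spec_Contem imagem_1 imagem_2 out) := by unfold Spec_Contem; infer_instance

-- ===== CLAIM (what is proved, stated in full; the proofs are below) =====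
def Claim_equal_Contem : Prop := ∀ (imagem_1 : List (List Int)) (imagem_2 : List (List Int)), Dom_Contem imagem_1 imagem_2 → Pre_Contem imagem_1 imagem_2 → Spec_Contem imagem_1 imagem_2 (Contem imagem_1 imagem_2)

-- ===== LEMMAS AND PROOFS =====

theorem pv_any_congr_mem {α : Type} (l : List α) (f g : α → Bool)
    (h : ∀ x ∈ l, f x = g x) : l.any f = l.any g := by
  induction l with
  | nil => rfl
  | cons a t ih =>
    simp only [List.any_cons, h a (by simp), ih (fun x hx => h x (by simp [hx]))]

theorem pv_foldl_filter {α β : Type} (p : β → α → Bool) (ks : List β) (c : List α) :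
    ks.foldl (fun c k => c.filter (p k)) c
      = c.filter (fun j => ks.all (fun k => p k j)) := by
  induction ks generalizing c with
  | nil => simp
  | cons k t ih =>
    simp only [List.foldl_cons, ih, List.filter_filter, List.all_cons]
    apply List.filter_congr
    intro x _
    simp [Bool.and_comm]

theorem pv_slice_map_eq (i1 : List (List Int)) (i2 : List (List Int))
    (f : List Int → List Int) (n : Nat) (hn : n + i2.length ≤ i1.length) :
    (((i1.drop n).take i2.length).map f = i2) ↔
      ∀ m : Nat, (hm : m < i2.length) → f (i1[n+m]'(by omega)) = i2[m] := by
  induction i2 generalizing n with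
  | nil => simp
  | cons b bs ih =>
    have hlt : n < i1.length := by simp at hn; omega
    rw [List.drop_eq_getElem_cons hlt]
    simp only [List.length_cons, List.take_succ_cons, List.map_cons, List.cons.injEq]
    rw [ih (n+1) (by simp at hn ⊢; omega)]
    constructor
    · rintro ⟨h0, hr⟩ m hm
      cases m with
      | zero => simpa using h0
      | succ m' =>
        have := hr m' (by omega)
        simpa [Nat.add_assoc, Nat.add_comm 1 m'] using this
    · intro h
      refine ⟨by simpa using h 0 (by omega), fun m hm => ?_⟩
      have := h (m+1) (by omega)
      simpa [Nat.add_assoc, Nat.add_comm 1 m] using this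

theorem pv_getD_map_zero {α β : Type} (g : α → β) (xs : List α) (d : α) (d' : β)
    (h : xs ≠ []) :
    PySem.List.pyGetD (xs.map g) 0 d' = g (PySem.List.pyGetD xs 0 d) := by
  obtain ⟨a, t, rfl⟩ := List.exists_cons_of_ne_nil h
  simp [PySem.List.pyGetD_zero_cons]

theorem pv_pyGetD_zero {α : Type} (xs : List α) (d : α) (h : xs ≠ []) :
    PySem.List.pyGetD xs 0 d = xs[0]'(List.length_pos_iff.mpr h) := by
  obtain ⟨a, t, rfl⟩ := List.exists_cons_of_ne_nil h
  simp [PySem.List.pyGetD_zero_cons]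

theorem pv_getD_getD_map {α β γ : Type} (rows : List α) (pat : List β)
    (g : α → β → List γ) (r k : Int)
    (hr0 : 0 ≤ r) (hr : r < (rows.length:Int)) (hk0 : 0 ≤ k) (hk : k < (pat.length:Int)) :
    PySem.List.pyGetD (PySem.List.pyGetD (rows.map (fun row => pat.map (fun p => g row p))) r []) k []
      = g (rows[r.toNat]'(by omega)) (pat[k.toNat]'(by omega)) := by
  rw [PySem.List.pyGetD_eq_getElem (rows.map _) _ hr0 (by simpa using hr)]
  simp only [List.getElem_map]
  rw [PySem.List.pyGetD_eq_getElem (pat.map _) _ hk0 (by simpa using hk)]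
  simp only [List.getElem_map]

theorem pv_main (i1 : List (List Int)) (i2 : List (List Int))
    (_h1 : i1 ≠ []) (h2 : i2 ≠ []) : Contem i1 i2 = Contem_alt i1 i2 := by
  have hl2 : 0 < i2.length := List.length_pos_iff.mpr h2
  simp only [Contem, Contem_alt]
  apply pv_any_congr_mem
  intro i hi
  rw [PySem.List.mem_pyRange_one] at hi
  obtain ⟨hi0, hiu⟩ := hi
  have hl2i : (0:Int) < (i2.length:Int) := by exact_mod_cast hl2
  have hil : i < (i1.length:Int) := by omega
  have hl1i : (0:Int) < (i1.length:Int) := by omega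
  rw [pv_foldl_filter]
  rw [PySem.List.pyGetD_eq_getElem _ _ hi0 (by simpa using hil)]
  simp only [List.getElem_map]
  rw [PySem.List.pyGetD_eq_getElem _ _ (by omega : (0:Int) ≤ 0) (by simpa using hl1i)]
  rw [pv_getD_map_zero _ i2 [] [] h2, List.filter_filter]
  rw [Bool.eq_iff_iff]
  simp only [List.any_eq_true, beq_iff_eq, Bool.not_eq_true', List.isEmpty_eq_false_iff,
    Int.toNat_zero, ne_eq, List.filter_eq_nil_iff]
  push Not
  refine exists_congr fun j => and_congr_right fun hj => ?_
  simp only [Bool.and_eq_true, beq_iff_eq, List.all_eq_true]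
  rw [PySem.List.slice_toNat i1 hi0 (by omega : (0:Int) ≤ i + (i2.length:Int))]
  rw [show ((i + (i2.length:Int)).toNat - i.toNat) = i2.length from by omega]
  rw [pv_slice_map_eq i1 i2 _ i.toNat (by omega)]
  constructor
  · intro h
    refine ⟨fun k hk => ?_, ?_⟩
    · rw [PySem.List.mem_pyRange_one] at hk
      obtain ⟨hk1, hk2⟩ := hk
      rw [pv_getD_getD_map i1 i2 _ (i+k) k (by omega) (by omega) (by omega) hk2]
      rw [List.contains_iff_mem, List.mem_filter]
      refine ⟨hj, ?_⟩
      have hidx : i1[(i+k).toNat]'(by omega) = i1[i.toNat + k.toNat]'(by omega) := by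
        congr 1; omega
      rw [hidx]
      simpa using h k.toNat (by omega)
    · have h00 := h 0 hl2
      simp only [Nat.add_zero] at h00
      exact h00.trans (pv_pyGetD_zero i2 [] h2).symm
  · rintro ⟨hall, h0⟩ m hm
    cases m with
    | zero => simpa using h0.trans (pv_pyGetD_zero i2 [] h2)
    | succ m' =>
      have hmem : ((m'+1 : Nat) : Int) ∈ PySem.List.pyRange 1 (i2.length:Int) 1 := by
        rw [PySem.List.mem_pyRange_one]
        constructor
        · exact_mod_cast Nat.succ_le_succ (Nat.zero_le m')
        · exact_mod_cast hm
      have := hall _ hmem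
      rw [pv_getD_getD_map i1 i2 _ (i + ((m'+1:Nat):Int)) ((m'+1:Nat):Int) (by omega) (by omega) (by omega) (by exact_mod_cast hm)] at this
      rw [List.contains_iff_mem, List.mem_filter] at this
      have hc := this.2
      rw [beq_iff_eq] at hc
      have hidx : i1[(i + ((m'+1:Nat):Int)).toNat]'(by omega) = i1[i.toNat + (m'+1)]'(by omega) := by
        congr 1; omega
      rw [hidx] at hc
      simpa using hc

theorem Contem_spec : Claim_equal_Contem := by
  intro i1 i2 _ hpre
  exact pv_main i1 i2 hpre.1 hpre.2
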